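-- pv_equiv track=rewrite | github.com/puneeth714/fourgp_bot | fourgp/analysis/trend.py | __touch__
-- ===== SOURCE A (Python) =====
-- def __touch__(touching, prices):
--     resistance_count = 0
--     support_count = 0
--     for each_price in prices["High"][::-1]:
--         resistance_count += 1
--         if each_price > touching[0]:
--             break
--     for each_price in prices["Low"][::-1]:
--         support_count += 1
--         if each_price < touching[1]:
--             break
--     return resistance_count, support_count
-- ===== SOURCE B (Python) =====
-- def __touch__(touching, prices):
--     highs = prices["High"]
--     lows = prices["Low"]
--     last_r = None
--     for i, x in enumerate(highs):
--         if x > touching[0]: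
--             last_r = i
--     last_s = None
--     for i, x in enumerate(lows):
--         if x < touching[1]:
--             last_s = i
--     resistance_count = len(highs) if last_r is None else len(highs) - last_r
--     support_count = len(lows) if last_s is None else len(lows) - last_s
--     return resistance_count, support_count
-- ===== Notes on version B (the rewrite author's own statement) =====
-- stated objective: alternative
-- what changed: B scans each list forward once, maintaining the index of the last crossing, and derives the count as len - last, instead of A's reversed-copy scan with a counter and early break.
import Mathlib
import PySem

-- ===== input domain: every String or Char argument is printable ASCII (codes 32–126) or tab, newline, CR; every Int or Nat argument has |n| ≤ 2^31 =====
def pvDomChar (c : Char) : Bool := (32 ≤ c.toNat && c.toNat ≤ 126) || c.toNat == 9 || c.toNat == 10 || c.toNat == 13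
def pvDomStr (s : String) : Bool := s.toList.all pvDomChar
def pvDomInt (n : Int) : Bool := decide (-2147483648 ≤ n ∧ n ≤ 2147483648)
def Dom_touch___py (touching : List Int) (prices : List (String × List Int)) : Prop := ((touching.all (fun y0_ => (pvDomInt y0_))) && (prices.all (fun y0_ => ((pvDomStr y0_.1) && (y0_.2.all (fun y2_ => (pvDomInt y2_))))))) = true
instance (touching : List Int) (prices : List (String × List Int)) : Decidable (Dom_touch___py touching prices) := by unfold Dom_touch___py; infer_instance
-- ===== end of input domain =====

-- B replaces A's reversed-copy scan with counter+break by a single forward pass per list that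
-- keeps the last crossing index and returns len - last; alternative decomposition, not claimed faster.


-- ===== PORT A =====
-- the for-loop with 'count += 1' then 'if p(x): break', used once per list of A;
-- the crossing test is an Option predicate: 'none' (touching too short) never fires,
-- those inputs are outside Pre_touch___py (Python raises IndexError there).
def pvLoopBreak (p : Int → Bool) (acc : Int) : List Int → Int
  | [] => acc
  | x :: xs => if p x then acc + 1 else pvLoopBreak p (acc + 1) xs

def touch___py (touching : List Int) (prices : List (String × List Int)) : Int × Int :=
  match (PySem.Dict.mk prices).get? "High", (PySem.Dict.mk prices).get? "Low" with
  | some high, some low =>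
      -- prices["High"][::-1] : slice? … (-1) = some (reverse); getD is safe, step ≠ 0
      let revHigh := (PySem.List.slice? high none none (-1)).getD []
      let revLow := (PySem.List.slice? low none none (-1)).getD []
      let r := pvLoopBreak (fun x => (PySem.List.pyGet? touching 0).any (fun t => x > t)) 0 revHigh
      let s := pvLoopBreak (fun x => (PySem.List.pyGet? touching 1).any (fun t => x < t)) 0 revLow
      (r, s)
  | _, _ => (0, 0)  -- KeyError in Python; outside Pre_touch___py

-- ===== PORT B =====
-- forward pass: index of the LAST element satisfying p (B's enumerate loop updating `last`)
def pvLastCross (p : Int → Bool) (xs : List Int) : Option Int :=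
  (PySem.List.enumerate xs 0).foldl (fun last ix => if p ix.2 then some ix.1 else last) none

def touch___py_alt (touching : List Int) (prices : List (String × List Int)) : Int × Int :=
  (((PySem.Dict.mk prices).get? "High").bind (fun high =>
    ((PySem.Dict.mk prices).get? "Low").map (fun low =>
      let r := (pvLastCross (fun x => (PySem.List.pyGet? touching 0).any (fun t => x > t)) high).elim
                 ((high.length : Int)) (fun i => (high.length : Int) - i)
      let s := (pvLastCross (fun x => (PySem.List.pyGet? touching 1).any (fun t => x < t)) low).elim
                 ((low.length : Int)) (fun i => (low.length : Int) - i)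
      (r, s)))).getD (0, 0)  -- none = KeyError in Python; outside Pre_touch___py

-- ===== PRECONDITION & SPEC =====
-- Pre_ excludes exactly the inputs where Python raises: a missing "High"/"Low" key (KeyError),
-- or touching too short while the corresponding list is non-empty (IndexError on touching[0]/[1]).
def Pre_touch___py (touching : List Int) (prices : List (String × List Int)) : Prop :=
  ((PySem.Dict.mk prices).get? "High").isSome ∧ ((PySem.Dict.mk prices).get? "Low").isSome ∧
  (((PySem.Dict.mk prices).get? "High").getD [] ≠ [] → 1 ≤ touching.length) ∧
  (((PySem.Dict.mk prices).get? "Low").getD [] ≠ [] → 2 ≤ touching.length)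
instance (touching : List Int) (prices : List (String × List Int)) : Decidable (Pre_touch___py touching prices) := by unfold Pre_touch___py; infer_instance

def pvWitness_touch___py : List Int × (List (String × List Int)) :=
  ([5, 2], [("High", [3, 6, 4]), ("Low", [1, 3])])

def Spec_touch___py (touching : List Int) (prices : List (String × List Int)) (out : Int × Int) : Prop := out = touch___py_alt touching prices
instance (touching : List Int) (prices : List (String × List Int)) (out : Int × Int) : Decidable (Spec_touch___py touching prices out) := by unfold Spec_touch___py; infer_instance

-- ===== CLAIM (what is proved, stated in full; the proofs are below) =====
def Claim_equal_touch___py : Prop := ∀ (touching : List Int) (prices : List (String × List Int)), Dom_touch___py touching prices → Pre_touch___py touching prices → Spec_touch___py touching prices (touch___py touching prices)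

-- ===== LEMMAS AND PROOFS =====

-- shifting the accumulator out of the break loop
theorem pvLoopBreak_acc (p : Int → Bool) (acc : Int) (xs : List Int) :
    pvLoopBreak p acc xs = acc + pvLoopBreak p 0 xs := by
  induction xs generalizing acc with
  | nil => simp [pvLoopBreak]
  | cons x xs ih =>
    simp only [pvLoopBreak]
    by_cases h : p x
    · simp [h]
    · simp [h, ih (acc + 1), ih 1]; ring

-- the last-crossing fold, one element appended
theorem pvLastCross_append (p : Int → Bool) (xs : List Int) (y : Int) :
    pvLastCross p (xs ++ [y]) =
      if p y then some (xs.length : Int) else pvLastCross p xs := by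
  simp [pvLastCross, PySem.List.enumerate_append, PySem.List.enumerate]

-- core: counting from the end until the first crossing equals len - (last forward crossing)
theorem pvLoop_eq_lastCross (p : Int → Bool) (xs : List Int) :
    pvLoopBreak p 0 xs.reverse =
      (match pvLastCross p xs with
       | none => (xs.length : Int)
       | some i => (xs.length : Int) - i) := by
  induction xs using List.reverseRecOn with
  | nil => simp [pvLoopBreak, pvLastCross, PySem.List.enumerate]
  | append_singleton xs y ih =>
    rw [List.reverse_append, pvLastCross_append]
    simp only [List.reverse_singleton, List.singleton_append, pvLoopBreak]
    by_cases h : p y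
    · simp [h]
    · simp only [h]
      rw [pvLoopBreak_acc, ih]
      cases hc : pvLastCross p xs <;> simp <;> ring

theorem touch___py_spec : Claim_equal_touch___py := by
  intro touching prices _ _
  unfold Spec_touch___py touch___py touch___py_alt
  cases hH : (PySem.Dict.mk prices).get? "High" <;>
    cases hL : (PySem.Dict.mk prices).get? "Low" <;> simp
  rename_i high low
  rw [PySem.List.slice?_none_none_neg_one, PySem.List.slice?_none_none_neg_one]
  simp only [Option.getD_some]
  rw [pvLoop_eq_lastCross, pvLoop_eq_lastCross]
  constructor <;> (cases pvLastCross _ _ <;> simp)
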